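-- pv_equiv track=rewrite | github.com/SJSURoboticsTeam/urc-machiato-2026 | tests/integration/test_synchronization_optimization.py | _check_shutdown_order_consistency
-- ===== SOURCE A (Python) =====
-- from typing import Dict, List, Any, Optional, Callable
--
-- def _check_shutdown_order_consistency(shutdown_sequences: List[Dict[str, Any]]) -> bool:
--     """Check if shutdown order is consistent across runs."""
--     if not shutdown_sequences:
--         return True
--
--     first_order = [c["name"] for c in shutdown_sequences[0]["components"]]
--
--     for sequence in shutdown_sequences[1:]:
--         current_order = [c["name"] for c in sequence["components"]]
--         if current_order != first_order:
--             return False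
--
--     return True
-- ===== SOURCE B (Python) =====
-- from typing import Dict, List, Any
--
--
-- def _check_shutdown_order_consistency(shutdown_sequences: List[Dict[str, Any]]) -> bool:
--     """Check if shutdown order is consistent across runs."""
--     orders = [[c["name"] for c in s["components"]] for s in shutdown_sequences]
--     return min(orders, default=None) == max(orders, default=None)
-- ===== Notes on version B (the rewrite author's own statement) =====
-- stated objective: alternative
-- what changed: B characterizes 'all orderings equal' order-theoretically: it materializes every sequence's name list and returns whether the lexicographic minimum equals the lexicographic maximum, instead of A's compare-each-against-the-first loop with early exit.
import Mathlib
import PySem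

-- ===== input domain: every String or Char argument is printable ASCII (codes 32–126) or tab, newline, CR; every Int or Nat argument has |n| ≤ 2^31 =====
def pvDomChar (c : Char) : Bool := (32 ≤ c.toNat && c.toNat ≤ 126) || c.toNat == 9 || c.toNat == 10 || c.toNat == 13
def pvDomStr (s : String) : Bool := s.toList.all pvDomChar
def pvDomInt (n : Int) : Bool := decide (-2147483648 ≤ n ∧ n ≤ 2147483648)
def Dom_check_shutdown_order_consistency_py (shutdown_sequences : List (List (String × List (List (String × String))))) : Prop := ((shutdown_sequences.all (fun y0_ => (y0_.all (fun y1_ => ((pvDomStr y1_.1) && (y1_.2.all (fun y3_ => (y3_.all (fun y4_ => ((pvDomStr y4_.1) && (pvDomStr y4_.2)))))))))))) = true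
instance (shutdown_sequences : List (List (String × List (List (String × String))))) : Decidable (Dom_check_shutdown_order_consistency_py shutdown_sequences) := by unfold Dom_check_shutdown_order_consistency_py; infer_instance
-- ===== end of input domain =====

-- B replaces A's compare-each-against-the-first loop by an order-theoretic check:
-- the lexicographic minimum of the name lists equals their maximum (objective: alternative).

-- [c["name"] for c in s["components"]] — shared comprehension of both Pythons.
-- The getD defaults are never reached under Pre_ (Python raises KeyError there).
def pvOrderOf (s : List (String × List (List (String × String)))) : List String :=
  (PySem.Dict.getD (PySem.Dict.mk s) "components" []).map
    (fun c => PySem.Dict.getD (PySem.Dict.mk c) "name" "")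

-- ===== PORT A =====
-- the 'for sequence in shutdown_sequences[1:]' loop with early return False
def pvLoopA (first : List String) :
    List (List (String × List (List (String × String)))) → Bool
  | [] => true
  | s :: rest => if pvOrderOf s ≠ first then false else pvLoopA first rest

def check_shutdown_order_consistency_py (shutdown_sequences : List (List (String × List (List (String × String))))) : Bool :=
  if shutdown_sequences = [] then true
  else
    let first_order := pvOrderOf (PySem.List.pyGetD shutdown_sequences 0 [])
    pvLoopA first_order (PySem.List.slice shutdown_sequences (some 1) none)

-- ===== PORT B =====
def check_shutdown_order_consistency_py_alt (shutdown_sequences : List (List (String × List (List (String × String))))) : Bool :=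
  let orders := shutdown_sequences.map pvOrderOf
  decide (PySem.List.min? orders (fun x => x) = PySem.List.max? orders (fun x => x))

-- ===== PRECONDITION & SPEC =====
-- Pre_ excludes exactly the inputs on which a "components" or "name" key is missing:
-- there the Python A (and B) raises KeyError; on a few of those A still returns
-- (early False before reaching the bad sequence) but B's comprehension raises.
def Pre_check_shutdown_order_consistency_py (shutdown_sequences : List (List (String × List (List (String × String))))) : Prop :=
  ∀ s ∈ shutdown_sequences,
    (PySem.Dict.contains (PySem.Dict.mk s) "components" = true) ∧
    ∀ c ∈ PySem.Dict.getD (PySem.Dict.mk s) "components" [],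
      PySem.Dict.contains (PySem.Dict.mk c) "name" = true
instance (shutdown_sequences : List (List (String × List (List (String × String))))) : Decidable (Pre_check_shutdown_order_consistency_py shutdown_sequences) := by unfold Pre_check_shutdown_order_consistency_py; infer_instance

def pvWitness_check_shutdown_order_consistency_py : (List (List (String × List (List (String × String))))) :=
  [[("components", [[("name", "imu")], [("name", "drive")]])],
   [("components", [[("name", "imu")], [("name", "drive")]])]]

def Spec_check_shutdown_order_consistency_py (shutdown_sequences : List (List (String × List (List (String × String))))) (out : Bool) : Prop := out = check_shutdown_order_consistency_py_alt shutdown_sequences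
instance (shutdown_sequences : List (List (String × List (List (String × String))))) (out : Bool) : Decidable (Spec_check_shutdown_order_consistency_py shutdown_sequences out) := by unfold Spec_check_shutdown_order_consistency_py; infer_instance

-- ===== CLAIM (what is proved, stated in full; the proofs are below) =====
def Claim_equal_check_shutdown_order_consistency_py : Prop := ∀ (shutdown_sequences : List (List (String × List (List (String × String))))), Dom_check_shutdown_order_consistency_py shutdown_sequences → Pre_check_shutdown_order_consistency_py shutdown_sequences → Spec_check_shutdown_order_consistency_py shutdown_sequences (check_shutdown_order_consistency_py shutdown_sequences)

-- ===== LEMMAS AND PROOFS =====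

-- a nonempty list has minimum = maximum exactly when every element equals the head
theorem pv_allhead_iff_min_eq_max {α : Type} [LinearOrder α] (a : α) (ys : List α) :
    (PySem.List.min? (a :: ys) (fun x => x) = PySem.List.max? (a :: ys) (fun x => x))
      ↔ ∀ y ∈ ys, y = a := by
  constructor
  · intro h
    cases hm : PySem.List.min? (a :: ys) (fun x => x) with
    | none => simp [PySem.List.min?_eq_none_iff] at hm
    | some m =>
      rw [hm] at h
      have hmin := PySem.List.min?_isMin hm
      have hmax := PySem.List.max?_isMax h.symm
      intro y hy
      have h1 := le_antisymm (hmax y (by simp [hy])) (hmin y (by simp [hy]))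
      have h2 := le_antisymm (hmax a (by simp)) (hmin a (by simp))
      simp at h1 h2
      rw [h1, h2]
  · intro h
    cases hm : PySem.List.min? (a :: ys) (fun x => x) with
    | none => simp [PySem.List.min?_eq_none_iff] at hm
    | some m =>
      cases hM : PySem.List.max? (a :: ys) (fun x => x) with
      | none => simp [PySem.List.max?_eq_none_iff] at hM
      | some M =>
        have h1 : m = a := by
          rcases List.mem_cons.mp (PySem.List.min?_mem hm) with h' | h'
          · exact h'
          · exact h m h'
        have h2 : M = a := by
          rcases List.mem_cons.mp (PySem.List.max?_mem hM) with h' | h'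
          · exact h'
          · exact h M h'
        rw [h1, h2]

theorem pv_loopA_eq (t : List (List (String × List (List (String × String)))))
    (first : List String) :
    pvLoopA first t = decide (∀ x ∈ t, pvOrderOf x = first) := by
  induction t with
  | nil => simp [pvLoopA]
  | cons s rest ih =>
    simp only [pvLoopA, ih]
    by_cases h : pvOrderOf s = first <;> simp [h]

-- ===== VERDICT (by name: the statement is the Claim_ definition above) =====
theorem check_shutdown_order_consistency_py_spec : Claim_equal_check_shutdown_order_consistency_py := by
  intro xs _ _
  unfold Spec_check_shutdown_order_consistency_py
  unfold check_shutdown_order_consistency_py check_shutdown_order_consistency_py_alt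
  cases xs with
  | nil =>
    have h1 : PySem.List.min? (List.map pvOrderOf []) (fun x => x) = none :=
      (PySem.List.min?_eq_none_iff _ _).mpr rfl
    have h2 : PySem.List.max? (List.map pvOrderOf []) (fun x => x) = none :=
      (PySem.List.max?_eq_none_iff _ _).mpr rfl
    simp
    exact h1.trans h2.symm
  | cons h t =>
    simp only [List.cons_ne_nil, if_false, PySem.List.pyGetD_zero_cons,
      PySem.List.slice_from_one, List.tail_cons, List.map]
    rw [pv_loopA_eq, decide_eq_decide]
    have hmap : (∀ x ∈ t, pvOrderOf x = pvOrderOf h)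
        ↔ ∀ y ∈ t.map pvOrderOf, y = pvOrderOf h := by simp
    rw [hmap]
    -- convert bridges the syntactically different (defeq) order instances on List String
    convert (pv_allhead_iff_min_eq_max (pvOrderOf h) (t.map pvOrderOf)).symm using 3
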